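-- pv_equiv track=rewrite | github.com/shirley-yu/2048 | 2048.py | combine_shifted
-- ===== SOURCE A (Python) =====
-- def combine_shifted(tiles):
--     for i in range(len(tiles)):
--         for j in range(len(tiles[i])):
--             if (j+1 < len(tiles[i])):
--                 if(tiles[i][j] == tiles[i][j+1]):
--                     tiles[i][j] += tiles[i][j+1]
--                     tiles[i].pop(j+1)
--     return tiles
-- ===== SOURCE B (Python) =====
-- def combine_shifted(tiles):
--     for r in range(len(tiles)):
--         row = tiles[r]
--         merged = []
--         i = 0
--         while i < len(row):
--             if i + 1 < len(row) and row[i] == row[i + 1]: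
--                 merged.append(row[i] + row[i + 1])
--                 i += 2
--             else:
--                 merged.append(row[i])
--                 i += 1
--         tiles[r][:] = merged
--     return tiles
-- ===== Notes on version B (the rewrite author's own statement) =====
-- stated objective: simpler
-- what changed: Each row is rebuilt in a single forward pass into a fresh list (append merged pair and skip two, or append one) written back by slice-assignment, instead of A's frozen-range index loop that destructively pops from the row it is indexing.
import Mathlib
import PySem

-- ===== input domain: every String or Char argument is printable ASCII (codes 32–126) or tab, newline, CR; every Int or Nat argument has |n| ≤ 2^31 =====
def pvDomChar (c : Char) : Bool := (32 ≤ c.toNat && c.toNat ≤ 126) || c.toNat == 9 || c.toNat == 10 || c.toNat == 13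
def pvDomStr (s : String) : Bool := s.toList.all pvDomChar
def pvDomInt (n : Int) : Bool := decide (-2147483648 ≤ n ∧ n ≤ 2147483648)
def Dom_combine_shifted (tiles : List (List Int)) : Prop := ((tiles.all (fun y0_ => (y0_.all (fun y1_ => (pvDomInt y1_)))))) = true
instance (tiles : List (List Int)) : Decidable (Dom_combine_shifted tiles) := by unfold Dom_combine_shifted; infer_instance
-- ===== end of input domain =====

-- B rebuilds each row with one forward pass into a fresh list instead of A's frozen-range index
-- loop that pops from the row it is indexing (objective: simpler). Both Pythons mutate `tiles`
-- in place (A pops from rows, B slice-assigns each row); the equivalence proved is about the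
-- returned value.

-- ===== PORT A =====
-- one step of A's inner loop at index j; the guard re-reads the live length, as A does
def innerStepA (r : List Int) (j : Nat) : List Int :=
  if j + 1 < r.length then
    if r.getD j 0 = r.getD (j+1) 0 then
      (r.set j (r.getD j 0 + r.getD (j+1) 0)).eraseIdx (j+1)
    else r
  else r

def combine_shifted (tiles : List (List Int)) : List (List Int) :=
  (List.range tiles.length).foldl
    (fun ts i => ts.set i ((List.range (ts.getD i []).length).foldl innerStepA (ts.getD i [])))
    tiles

-- ===== PORT B =====
-- Source B's while loop: index i over the (unchanged) row, accumulator `merged`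
def mergeGo (row : List Int) (i : Nat) (acc : List Int) : List Int :=
  if i < row.length then
    if i + 1 < row.length ∧ row.getD i 0 = row.getD (i+1) 0 then
      mergeGo row (i+2) (acc ++ [row.getD i 0 + row.getD (i+1) 0])
    else
      mergeGo row (i+1) (acc ++ [row.getD i 0])
  else acc
termination_by row.length - i

def combine_shifted_alt (tiles : List (List Int)) : List (List Int) :=
  tiles.map (fun row => mergeGo row 0 [])

-- ===== PRECONDITION & SPEC =====
def Spec_combine_shifted (tiles : List (List Int)) (out : List (List Int)) : Prop := out = combine_shifted_alt tiles
instance (tiles : List (List Int)) (out : List (List Int)) : Decidable (Spec_combine_shifted tiles out) := by unfold Spec_combine_shifted; infer_instance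

-- ===== CLAIM (what is proved, stated in full; the proofs are below) =====
def Claim_equal_combine_shifted : Prop := ∀ (tiles : List (List Int)), Dom_combine_shifted tiles → Spec_combine_shifted tiles (combine_shifted tiles)

-- ===== LEMMAS AND PROOFS =====

-- reference merge of one row: both ports compute this transform
def mspec : List Int → List Int
  | [] => []
  | [a] => [a]
  | a :: b :: t => if a = b then (a+b) :: mspec t else a :: mspec (b :: t)

theorem drop2 (r : List Int) (i : Nat) (h : i + 1 < r.length) :
    r.drop i = r[i] :: r[i+1] :: r.drop (i+2) := by
  rw [List.drop_eq_getElem_cons (by omega), List.drop_eq_getElem_cons (show i+1 < r.length by omega)]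

theorem take_succ_of_lt (r : List Int) (j : Nat) (h : j < r.length) :
    r.take (j+1) = r.take j ++ [r[j]] := by
  rw [List.take_add_one, List.getElem?_eq_getElem h]
  rfl

-- shape of A's row after a merge at j: the merged pair replaces positions j, j+1
theorem merged_shape (r : List Int) (j : Nat) (h : j + 1 < r.length) :
    (r.set j (r.getD j 0 + r.getD (j+1) 0)).eraseIdx (j+1)
      = (r.take j ++ [r[j] + r[j+1]]) ++ r.drop (j+2) := by
  have hj : j < r.length := by omega
  rw [List.eraseIdx_eq_take_drop_succ, List.take_set, List.drop_set,
      if_pos (show j < j+1+1 by omega)]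
  rw [take_succ_of_lt r j hj, List.getD_eq_getElem r 0 hj, List.getD_eq_getElem r 0 h]
  rw [List.set_append_right _ _ (by simp [Nat.min_eq_left (le_of_lt hj)])]
  simp [Nat.min_eq_left (le_of_lt hj)]

-- invariant of A's inner loop: the processed prefix is frozen and the rest merges to mspec
theorem innerA_eq (k : Nat) : ∀ (j : Nat) (r : List Int), r.length ≤ j + k →
    (List.range' j k).foldl innerStepA r = r.take j ++ mspec (r.drop j) := by
  induction k with
  | zero =>
    intro j r h
    have h' : r.length ≤ j := by omega
    rw [List.take_of_length_le h', List.drop_of_length_le h']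
    simp [mspec]
  | succ k ih =>
    intro j r h
    rw [List.range'_succ, List.foldl_cons]
    show (List.range' (j+1) k).foldl innerStepA (innerStepA r j) = _
    by_cases h1 : j + 1 < r.length
    · have hj : j < r.length := by omega
      have hgj := List.getD_eq_getElem r 0 hj
      have hgj1 := List.getD_eq_getElem r 0 h1
      by_cases h2 : r.getD j 0 = r.getD (j+1) 0
      · have h2' : r[j] = r[j+1] := by rw [hgj, hgj1] at h2; exact h2
        rw [innerStepA, if_pos h1, if_pos h2, merged_shape r j h1]
        have hlen : (r.take j ++ [r[j] + r[j+1]]).length = j+1 := by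
          simp [Nat.min_eq_left (le_of_lt hj)]
        rw [ih (j+1) _ (by simp [Nat.min_eq_left (le_of_lt hj)]; omega)]
        have ht : ((r.take j ++ [r[j] + r[j+1]]) ++ r.drop (j+2)).take (j+1)
            = r.take j ++ [r[j] + r[j+1]] := by
          rw [List.take_append_of_le_length (by omega), List.take_of_length_le (by omega)]
        have hd : ((r.take j ++ [r[j] + r[j+1]]) ++ r.drop (j+2)).drop (j+1)
            = r.drop (j+2) := by
          rw [List.drop_append_of_le_length (by omega), List.drop_of_length_le (by omega)]
          simp
        rw [ht, hd, drop2 r j h1]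
        rw [show mspec (r[j] :: r[j+1] :: r.drop (j+2)) = (r[j] + r[j+1]) :: mspec (r.drop (j+2)) by
          simp [mspec, h2']]
        simp
      · rw [innerStepA, if_pos h1, if_neg h2]
        rw [ih (j+1) r (by omega)]
        have h2' : ¬ r[j] = r[j+1] := by rw [hgj, hgj1] at h2; exact h2
        rw [take_succ_of_lt r j hj, drop2 r j h1]
        rw [show mspec (r[j] :: r[j+1] :: r.drop (j+2)) = r[j] :: mspec (r[j+1] :: r.drop (j+2)) by
          simp [mspec, h2']]
        rw [← List.drop_eq_getElem_cons h1, List.append_assoc, List.singleton_append]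
    · rw [innerStepA, if_neg h1]
      rw [ih (j+1) r (by omega)]
      by_cases hj : j < r.length
      · rw [take_succ_of_lt r j hj, List.drop_eq_getElem_cons hj,
            List.drop_of_length_le (show r.length ≤ j+1 by omega)]
        simp [mspec]
      · have h' : r.length ≤ j := by omega
        rw [List.take_of_length_le h', List.take_of_length_le (by omega),
            List.drop_of_length_le h', List.drop_of_length_le (by omega)]

-- invariant of B's while loop
theorem mergeGo_eq (row : List Int) (k : Nat) : ∀ (i : Nat) (acc : List Int), row.length ≤ i + k →
    mergeGo row i acc = acc ++ mspec (row.drop i) := by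
  induction k with
  | zero =>
    intro i acc h
    rw [mergeGo]
    simp [show ¬ i < row.length by omega, List.drop_of_length_le (by omega : row.length ≤ i), mspec]
  | succ k ih =>
    intro i acc h
    rw [mergeGo]
    by_cases hi : i < row.length
    · simp only [hi, if_true]
      by_cases hm : i + 1 < row.length ∧ row.getD i 0 = row.getD (i+1) 0
      · obtain ⟨h1, h2'⟩ := hm
        have hgi := List.getD_eq_getElem row 0 (show i < row.length by omega)
        have hgi1 := List.getD_eq_getElem row 0 h1
        have h2 : row[i] = row[i+1] := by rw [hgi, hgi1] at h2'; exact h2'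
        rw [if_pos ⟨h1, h2'⟩, ih (i+2) _ (by omega), drop2 row i h1]
        have e1 : row[i]? = some row[i] := List.getElem?_eq_getElem hi
        have e2 : row[i+1]? = some row[i+1] := List.getElem?_eq_getElem h1
        simp [mspec, h2, e1, e2]
      · simp only [hm, if_false]
        rw [ih (i+1) _ (by omega)]
        rw [List.drop_eq_getElem_cons hi]
        rw [List.getD_eq_getElem _ _ hi]
        by_cases h1 : i + 1 < row.length
        · have h2 : ¬ row[i] = row[i+1] := by
            intro hq
            exact hm ⟨h1, by rw [List.getD_eq_getElem _ _ hi, List.getD_eq_getElem _ _ h1]; exact hq⟩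
          rw [List.drop_eq_getElem_cons h1]
          simp [mspec, h2]
        · have : row.drop (i+1) = [] := List.drop_of_length_le (by omega)
          rw [this]
          simp [mspec]
    · simp [hi, List.drop_of_length_le (by omega : row.length ≤ i), mspec]

-- invariant of A's outer loop: rows before j are done, rows from j still to be mapped
theorem outer_eq (f : List Int → List Int) (k : Nat) : ∀ (j : Nat) (ts : List (List Int)), ts.length ≤ j + k →
    (List.range' j k).foldl (fun ts i => ts.set i (f (ts.getD i []))) ts
      = ts.take j ++ (ts.drop j).map f := by
  induction k with
  | zero =>
    intro j ts h
    have h' : ts.length ≤ j := by omega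
    rw [List.take_of_length_le h', List.drop_of_length_le h']
    simp
  | succ k ih =>
    intro j ts h
    rw [List.range'_succ, List.foldl_cons]
    rw [ih (j+1) (ts.set j (f (ts.getD j []))) (by simp; omega)]
    by_cases hj : j < ts.length
    · rw [List.take_add_one, List.take_set, List.drop_set]
      simp [List.set_eq_of_length_le, hj]
      rw [List.drop_eq_getElem_cons (show j < (List.map f ts).length by simpa using hj)]
      simp
    · have hle : ts.length ≤ j := by omega
      rw [List.set_eq_of_length_le hle]
      rw [List.take_of_length_le hle, List.take_of_length_le (by omega),
          List.drop_of_length_le hle, List.drop_of_length_le (by omega)]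

-- ===== VERDICT (by name: the statement is the Claim_ definition above) =====
theorem combine_shifted_spec : Claim_equal_combine_shifted := by
  intro tiles _
  unfold Spec_combine_shifted combine_shifted combine_shifted_alt
  have h1 : ∀ r : List Int, (List.range r.length).foldl innerStepA r = mspec r := by
    intro r
    have := innerA_eq r.length 0 r (by omega)
    simpa [List.range_eq_range'] using this
  have h2 : ∀ r : List Int, mergeGo r 0 [] = mspec r := by
    intro r
    simpa using mergeGo_eq r r.length 0 [] (by omega)
  calc (List.range tiles.length).foldl
        (fun ts i => ts.set i ((List.range (ts.getD i []).length).foldl innerStepA (ts.getD i [])))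
        tiles
      = (List.range' 0 tiles.length).foldl
        (fun ts i => ts.set i (mspec (ts.getD i []))) tiles := by
        rw [List.range_eq_range']
        apply PySem.List.foldl_congr_mem
        intro ts i _
        rw [h1]
    _ = tiles.map mspec := by
        simpa using outer_eq mspec tiles.length 0 tiles (by omega)
    _ = tiles.map (fun row => mergeGo row 0 []) := by
        exact (List.map_congr_left (fun r _ => (h2 r).symm))
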